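-- pv_equiv track=rewrite | github.com/AlexeySorokin/Paraphraser | work.py | split_by_colons
-- ===== SOURCE A (Python) =====
-- def split_by_colons(sent):
--     colon_indexes = [i for i, elem in enumerate(sent) if elem[1] == ":"]
--     colon_indexes = [-1] + colon_indexes + [len(sent) - 1]
--     answer = []
--     for j, start in enumerate(colon_indexes[:-1]):
--         end = colon_indexes[j+1]
--         curr_phrase = sent[start+1:end+1]
--         if j >= 1:
--             for index, elem in enumerate(curr_phrase):
--                 elem[0] = str(index+1)
--         answer.append(curr_phrase)
--     return answer
-- ===== SOURCE B (Python) =====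
-- def split_by_colons(sent):
--     segments = [[]]
--     for elem in sent:
--         segments[-1].append(elem)
--         if elem[1] == ":":
--             segments.append([])
--     for seg in segments[1:]:
--         for k, elem in enumerate(seg):
--             elem[0] = str(k + 1)
--     return segments
-- ===== Notes on version B (the rewrite author's own statement) =====
-- stated objective: simpler
-- what changed: Replaces A's two-phase index arithmetic (collect colon indexes via enumerate, then slice sent between consecutive indexes) with a single streaming pass that appends each element to the current segment and closes it after a colon, relabelling every segment but the first afterwards; Pre_ excludes inputs with an element of length < 2, on which both A and B raise IndexError.
import Mathlib
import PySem

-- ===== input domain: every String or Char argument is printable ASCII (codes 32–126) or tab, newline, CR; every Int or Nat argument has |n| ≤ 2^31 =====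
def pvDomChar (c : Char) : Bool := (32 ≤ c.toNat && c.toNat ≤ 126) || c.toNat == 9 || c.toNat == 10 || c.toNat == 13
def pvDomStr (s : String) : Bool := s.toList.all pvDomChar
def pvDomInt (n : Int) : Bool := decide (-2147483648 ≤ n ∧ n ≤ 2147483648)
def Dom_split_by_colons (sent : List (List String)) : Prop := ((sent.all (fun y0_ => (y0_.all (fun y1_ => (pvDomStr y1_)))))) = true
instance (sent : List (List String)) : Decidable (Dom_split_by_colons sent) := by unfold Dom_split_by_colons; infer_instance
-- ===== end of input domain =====

-- B replaces A's two-phase index arithmetic (collect colon indexes, slice between consecutive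
-- indexes) with one streaming pass that closes the current segment after each colon, then
-- relabels every segment but the first.  Both A and B relabel the shared element lists in place
-- in Python (the same mutation of sent's elements); the equivalence proved here is about the
-- return value.

-- relabel one segment: elem[0] = str(index+1) for index, elem in enumerate(seg)
-- (Python raises on an empty elem; under Pre_ every elem is nonempty, List.set is exact there)
def relabelSeg (seg : List (List String)) : List (List String) :=
  (PySem.List.enumerate seg).map (fun q => q.2.set 0 (PySem.Int.toStr (q.1 + 1)))

-- ===== PORT A =====
def split_by_colons (sent : List (List String)) : List (List (List String)) :=
  let colon_indexes : List Int :=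
    (PySem.List.enumerate sent).filterMap
      (fun p => if PySem.List.pyGet? p.2 1 = some ":" then some p.1 else none)
  let ci : List Int := [-1] ++ colon_indexes ++ [(sent.length : Int) - 1]
  (PySem.List.enumerate (PySem.List.slice ci none (some (-1)))).foldl
    (fun answer p =>
      -- end = colon_indexes[j+1] : j+1 is always in range, so pyGetD is exact here
      let endi := PySem.List.pyGetD ci (p.1 + 1) 0
      let curr := PySem.List.slice sent (some (p.2 + 1)) (some (endi + 1))
      let curr := if p.1 ≥ 1 then relabelSeg curr else curr
      answer ++ [curr]) []

-- ===== PORT B =====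
-- the streaming loop: append elem to the current segment, close it after a colon
def altCollect (sent : List (List String)) (cur : List (List String)) :
    List (List (List String)) :=
  match sent with
  | [] => [cur]
  | e :: rest =>
      if PySem.List.pyGet? e 1 = some ":" then (cur ++ [e]) :: altCollect rest []
      else altCollect rest (cur ++ [e])

def split_by_colons_alt (sent : List (List String)) : List (List (List String)) :=
  match altCollect sent [] with
  | [] => []
  | h :: t => h :: t.map relabelSeg

-- ===== PRECONDITION & SPEC =====
-- Pre_ excludes exactly the inputs where the Python (both A and B) raises IndexError:
-- an element with fewer than 2 items (elem[1] is read for every element).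
def Pre_split_by_colons (sent : List (List String)) : Prop :=
  ∀ e ∈ sent, 2 ≤ e.length
instance (sent : List (List String)) : Decidable (Pre_split_by_colons sent) := by
  unfold Pre_split_by_colons; infer_instance

def pvWitness_split_by_colons : List (List String) :=
  [["A", "x"], ["B", ":"], ["C", "y"], ["D", "z"]]

def Spec_split_by_colons (sent : List (List String)) (out : List (List (List String))) : Prop := out = split_by_colons_alt sent
instance (sent : List (List String)) (out : List (List (List String))) : Decidable (Spec_split_by_colons sent out) := by unfold Spec_split_by_colons; infer_instance

-- ===== CLAIM (what is proved, stated in full; the proofs are below) =====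
def Claim_equal_split_by_colons : Prop := ∀ (sent : List (List String)), Dom_split_by_colons sent → Pre_split_by_colons sent → Spec_split_by_colons sent (split_by_colons sent)

-- ===== LEMMAS AND PROOFS =====

-- the common recursive characterisation of the segment list (before relabelling)
def segsF : List (List String) → List (List (List String))
  | [] => [[]]
  | e :: rest =>
      if PySem.List.pyGet? e 1 = some ":" then [e] :: segsF rest
      else
        match segsF rest with
        | [] => []
        | h :: t => (e :: h) :: t

lemma segsF_ne_nil (s : List (List String)) : segsF s ≠ [] := by
  induction s with
  | nil => simp [segsF]
  | cons e rest ih =>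
      simp only [segsF]
      split
      · simp
      · cases h : segsF rest with
        | nil => exact absurd h ih
        | cons a t => simp

-- B's loop computes segsF with the open segment as accumulator
lemma altCollect_eq (sent : List (List String)) :
    ∀ cur, altCollect sent cur =
      match segsF sent with
      | [] => []
      | h :: t => (cur ++ h) :: t := by
  induction sent with
  | nil => intro cur; simp [altCollect, segsF]
  | cons e rest ih =>
      intro cur
      simp only [altCollect, segsF]
      by_cases hc : PySem.List.pyGet? e 1 = some ":"
      · simp only [hc, if_true]
        rw [ih []]
        cases h : segsF rest with
        | nil => exact absurd h (segsF_ne_nil rest)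
        | cons a t => simp
      · simp only [if_neg hc]
        rw [ih (cur ++ [e])]
        cases h : segsF rest with
        | nil => exact absurd h (segsF_ne_nil rest)
        | cons a t => simp

-- ---------- A side ----------

def posIdx (sent : List (List String)) : List Int :=
  (PySem.List.enumerate sent).filterMap
    (fun p => if PySem.List.pyGet? p.2 1 = some ":" then some p.1 else none)

def mkCI (sent : List (List String)) : List Int :=
  [-1] ++ posIdx sent ++ [(sent.length : Int) - 1]

def zipAdj (l : List Int) : List (Int × Int) := l.zip l.tail

def rawSlices (sent : List (List String)) (ci : List Int) : List (List (List String)) :=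
  (zipAdj ci).map (fun q => PySem.List.slice sent (some (q.1 + 1)) (some (q.2 + 1)))

lemma enumerate_shift {α : Type} (xs : List α) (s : Int) :
    PySem.List.enumerate xs (s + 1) =
      (PySem.List.enumerate xs s).map (fun p => (p.1 + 1, p.2)) := by
  induction xs generalizing s with
  | nil => simp [PySem.List.enumerate_nil]
  | cons x xs ih =>
      rw [PySem.List.enumerate_cons, PySem.List.enumerate_cons, List.map_cons, ← ih (s + 1)]

lemma posIdx_cons (e : List String) (rest : List (List String)) :
    posIdx (e :: rest) =
      (if PySem.List.pyGet? e 1 = some ":" then [(0 : Int)] else [])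
        ++ (posIdx rest).map (· + 1) := by
  unfold posIdx
  rw [PySem.List.enumerate_cons, enumerate_shift, List.filterMap_cons, List.filterMap_map,
      List.map_filterMap]
  by_cases hc : PySem.List.pyGet? e 1 = some ":"
  · simp [hc, apply_ite]
  · simp [hc, apply_ite]

lemma mem_posIdx_nonneg (sent : List (List String)) :
    ∀ x ∈ posIdx sent, 0 ≤ x := by
  induction sent with
  | nil => simp [posIdx, PySem.List.enumerate_nil]
  | cons e rest ih =>
      intro x hx
      rw [posIdx_cons] at hx
      rcases List.mem_append.1 hx with h | h
      · split at h <;> simp_all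
      · obtain ⟨y, hy, rfl⟩ := List.mem_map.1 h
        have := ih y hy; omega

lemma mem_mkCI_ge (sent : List (List String)) : ∀ x ∈ mkCI sent, -1 ≤ x := by
  intro x hx
  unfold mkCI at hx
  simp only [List.append_assoc, List.mem_append, List.mem_cons, List.not_mem_nil,
    or_false] at hx
  rcases hx with h | h | h
  · omega
  · have := mem_posIdx_nonneg sent x h; omega
  · have : (0 : Int) ≤ (sent.length : Int) := by positivity
    omega

lemma zipAdj_map_add_one (l : List Int) :
    zipAdj (l.map (· + 1)) = (zipAdj l).map (fun q => (q.1 + 1, q.2 + 1)) := by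
  unfold zipAdj
  rw [← List.map_tail, List.zip_map]
  rfl

lemma slice_cons_shift {α : Type} (x : α) (xs : List α) (a b : Int)
    (ha : 0 ≤ a) (hb : 0 ≤ b) :
    PySem.List.slice (x :: xs) (some (a + 1)) (some (b + 1)) =
      PySem.List.slice xs (some a) (some b) := by
  rw [PySem.List.slice_toNat (ha := by omega) (hb := by omega),
      PySem.List.slice_toNat (ha := ha) (hb := hb)]
  have h1 : (a + 1).toNat = a.toNat + 1 := by omega
  have h2 : (b + 1).toNat = b.toNat + 1 := by omega
  rw [h1, h2, List.drop_succ_cons]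
  congr 1
  omega

lemma slice_cons_head {α : Type} (x : α) (xs : List α) (b : Int) (hb : 0 ≤ b) :
    PySem.List.slice (x :: xs) (some 0) (some (b + 1)) =
      x :: PySem.List.slice xs (some 0) (some b) := by
  rw [PySem.List.slice_toNat (ha := le_rfl) (hb := by omega),
      PySem.List.slice_toNat (ha := le_rfl) (hb := hb)]
  have h2 : (b + 1).toNat = b.toNat + 1 := by omega
  simp [h2, List.take_succ_cons]

lemma mkCI_cons (e : List String) (rest : List (List String)) :
    mkCI (e :: rest) =
      if PySem.List.pyGet? e 1 = some ":" then -1 :: (mkCI rest).map (· + 1)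
      else -1 :: ((mkCI rest).tail).map (· + 1) := by
  unfold mkCI
  rw [posIdx_cons]
  by_cases hc : PySem.List.pyGet? e 1 = some ":" <;>
    simp [hc, List.map_append, sub_add_cancel]

lemma zipAdj_cons_cons (a b : Int) (l : List Int) :
    zipAdj (a :: b :: l) = (a, b) :: zipAdj (b :: l) := rfl

lemma rawSlices_eq_segsF (sent : List (List String)) :
    rawSlices sent (mkCI sent) = segsF sent := by
  induction sent with
  | nil =>
      show (zipAdj (mkCI [])).map _ = _
      norm_num [mkCI, posIdx, PySem.List.enumerate_nil, zipAdj, segsF]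
      rw [PySem.List.slice_to (hb := le_rfl)]
      rfl
  | cons e rest ih =>
      have hne : posIdx rest ++ [((rest.length : Int)) - 1] ≠ [] := by simp
      obtain ⟨t0, T2, hT'⟩ := List.exists_cons_of_ne_nil hne
      have hT : mkCI rest = -1 :: t0 :: T2 := by
        unfold mkCI; rw [List.append_assoc, hT']; rfl
      have ht0 : -1 ≤ t0 := mem_mkCI_ge rest t0 (by rw [hT]; simp)
      have hbound := mem_mkCI_ge rest
      have hshift : ∀ (L : List Int), (∀ x ∈ L, -1 ≤ x) →
          (zipAdj (L.map (· + 1))).map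
              (fun q => PySem.List.slice (e :: rest) (some (q.1 + 1)) (some (q.2 + 1)))
            = (zipAdj L).map
              (fun q => PySem.List.slice rest (some (q.1 + 1)) (some (q.2 + 1))) := by
        intro L hL
        rw [zipAdj_map_add_one, List.map_map]
        apply List.map_congr_left
        intro q hq
        have h1 : q.1 ∈ L := (List.of_mem_zip hq).1
        have h2 : q.2 ∈ L := List.mem_of_mem_tail (List.of_mem_zip hq).2
        have hb1 := hL _ h1
        have hb2 := hL _ h2
        simp only [Function.comp]
        exact slice_cons_shift e rest (q.1 + 1) (q.2 + 1) (by omega) (by omega)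
      by_cases hc : PySem.List.pyGet? e 1 = some ":"
      · rw [rawSlices, mkCI_cons, if_pos hc]
        have hmap : (mkCI rest).map (· + 1) = 0 :: (t0 + 1) :: T2.map (· + 1) := by
          rw [hT]; simp only [List.map_cons]; norm_num
        rw [hmap, zipAdj_cons_cons, List.map_cons, ← hmap, hshift _ hbound]
        have hhead : PySem.List.slice (e :: rest) (some ((-1 : Int) + 1)) (some ((0 : Int) + 1))
            = [e] := by
          rw [show ((-1 : Int) + 1) = 0 by norm_num,
              PySem.List.slice_toNat (ha := le_rfl) (hb := by norm_num)]
          rfl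
        rw [hhead]
        show _ = segsF (e :: rest)
        unfold segsF
        rw [if_pos hc, ← ih]
        rfl
      · rw [rawSlices, mkCI_cons, if_neg hc, hT]
        simp only [List.tail_cons, List.map_cons]
        rw [zipAdj_cons_cons, List.map_cons]
        rw [show ((t0 + 1) :: T2.map (· + 1)) = (t0 :: T2).map (· + 1) from rfl]
        have hb' : ∀ x ∈ t0 :: T2, -1 ≤ x := by
          intro x hx
          exact hbound x (by rw [hT]; exact List.mem_cons_of_mem _ hx)
        rw [hshift _ hb']
        have hhead2 : PySem.List.slice (e :: rest) (some ((-1 : Int) + 1)) (some (t0 + 1 + 1))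
            = e :: PySem.List.slice rest (some ((-1 : Int) + 1)) (some (t0 + 1)) := by
          rw [show ((-1 : Int) + 1) = 0 by norm_num,
              slice_cons_head e rest (t0 + 1) (by omega)]
        rw [hhead2]
        have hsegs : segsF rest =
            PySem.List.slice rest (some ((-1 : Int) + 1)) (some (t0 + 1)) ::
              (zipAdj (t0 :: T2)).map
                (fun q => PySem.List.slice rest (some (q.1 + 1)) (some (q.2 + 1))) := by
          rw [← ih, rawSlices, hT, zipAdj_cons_cons, List.map_cons]
        show _ = segsF (e :: rest)
        unfold segsF
        rw [if_neg hc, hsegs]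

lemma zip_concat_tail (l : List Int) (a : Int) :
    (l ++ [a]).zip ((l ++ [a]).tail) = l.zip ((l ++ [a]).tail) := by
  induction l with
  | nil => simp
  | cons x l ih =>
      have hne : l ++ [a] ≠ [] := by simp
      obtain ⟨c, cs, hcs⟩ := List.exists_cons_of_ne_nil hne
      simp only [List.cons_append, List.tail_cons]
      rw [hcs, List.zip_cons_cons, List.zip_cons_cons]
      have := ih
      rw [hcs] at this
      simpa [hcs] using this

lemma aux_enum {β : Type} (g : Int → Int → β) :
    ∀ (s : List Int) (k : Nat) (ci rest : List Int),
      ci.drop k = s ++ rest → rest ≠ [] →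
      (PySem.List.enumerate s (k : Int)).map
          (fun p => g p.2 (PySem.List.pyGetD ci (p.1 + 1) 0))
        = (s.zip (s ++ rest).tail).map (fun q => g q.1 q.2) := by
  intro s
  induction s with
  | nil => intro k ci rest h hrest; simp [PySem.List.enumerate_nil]
  | cons x s2 ih =>
      intro k ci rest h hrest
      have hdrop : ci.drop (k + 1) = s2 ++ rest := by
        have := congrArg List.tail h
        simpa [List.tail_drop] using this
      have hne : s2 ++ rest ≠ [] := by
        intro hh; exact hrest (List.append_eq_nil_iff.1 hh).2
      obtain ⟨c, cs, hc⟩ := List.exists_cons_of_ne_nil hne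
      have hget : PySem.List.pyGetD ci ((k : Int) + 1) 0 = c := by
        have hcast : ((k : Int) + 1) = ((k + 1 : Nat) : Int) := by push_cast; ring
        rw [hcast, PySem.List.pyGetD_natCast]
        have : ci[(k + 1)]? = some c := by
          have h0 : (ci.drop (k + 1))[0]? = some c := by rw [hdrop, hc]; rfl
          rwa [List.getElem?_drop, Nat.add_zero] at h0
        simp [List.getD_eq_getElem?_getD, this]
      rw [PySem.List.enumerate_cons, List.map_cons, hget]
      have hcast : ((k : Int) + 1) = ((k + 1 : Nat) : Int) := by push_cast; ring
      rw [hcast, ih (k + 1) ci rest hdrop hrest]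
      have htail : ((x :: s2) ++ rest).tail = c :: cs := by
        simp only [List.cons_append, List.tail_cons]; rw [hc]
      rw [htail, List.zip_cons_cons, List.map_cons]
      congr 1
      rw [hc]
      rfl

lemma A_eq_raw (sent : List (List String)) :
    split_by_colons sent =
      match rawSlices sent (mkCI sent) with
      | [] => []
      | h :: t => h :: t.map relabelSeg := by
  obtain ⟨t0, T2, hT'⟩ := List.exists_cons_of_ne_nil
    (show posIdx sent ++ [((sent.length : Int)) - 1] ≠ [] by simp)
  have hT : mkCI sent = -1 :: t0 :: T2 := by
    unfold mkCI; rw [List.append_assoc, hT']; rfl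
  have hfold :
      split_by_colons sent =
        (PySem.List.enumerate ((mkCI sent).dropLast) 0).map
          (fun p =>
            let endi := PySem.List.pyGetD (mkCI sent) (p.1 + 1) 0
            let curr := PySem.List.slice sent (some (p.2 + 1)) (some (endi + 1))
            if p.1 ≥ 1 then relabelSeg curr else curr) := by
    simp only [split_by_colons, PySem.List.slice_to_neg_one]
    exact PySem.List.foldl_append_singleton_eq_map _ _ []
  rw [hfold]
  have hdl : (mkCI sent).dropLast = -1 :: posIdx sent := by
    unfold mkCI; rw [List.dropLast_concat]; rfl
  rw [hdl, PySem.List.enumerate_cons, List.map_cons]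
  -- the head term: j = 0, so no relabelling
  have hhead :
      (let endi := PySem.List.pyGetD (mkCI sent) ((0 : Int) + 1) 0
       let curr := PySem.List.slice sent (some ((-1 : Int) + 1)) (some (endi + 1))
       if (0 : Int) ≥ 1 then relabelSeg curr else curr) =
        PySem.List.slice sent (some ((-1 : Int) + 1)) (some (t0 + 1)) := by
    have hget : PySem.List.pyGetD (mkCI sent) ((0 : Int) + 1) 0 = t0 := by
      rw [show ((0 : Int) + 1) = ((1 : Nat) : Int) by norm_cast, PySem.List.pyGetD_natCast, hT]
      rfl
    simp only [hget, ge_iff_le]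
    rw [if_neg (by norm_num)]
  rw [hhead]
  -- the tail: every j is ≥ 1, so each segment is relabelled
  have htail :
      (PySem.List.enumerate (posIdx sent) (0 + 1)).map
          (fun p =>
            let endi := PySem.List.pyGetD (mkCI sent) (p.1 + 1) 0
            let curr := PySem.List.slice sent (some (p.2 + 1)) (some (endi + 1))
            if p.1 ≥ 1 then relabelSeg curr else curr) =
        ((posIdx sent).zip ((posIdx sent) ++ [((sent.length : Int)) - 1]).tail).map
          (fun q => relabelSeg (PySem.List.slice sent (some (q.1 + 1)) (some (q.2 + 1)))) := by
    have hmemge : ∀ p ∈ PySem.List.enumerate (posIdx sent) (0 + 1), (1 : Int) ≤ p.1 := by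
      intro p hp
      obtain ⟨k, hk, rfl⟩ := (PySem.List.mem_enumerate_iff _ _ _).1 hp
      simp only
      omega
    have hcong :
        (PySem.List.enumerate (posIdx sent) (0 + 1)).map
            (fun p =>
              let endi := PySem.List.pyGetD (mkCI sent) (p.1 + 1) 0
              let curr := PySem.List.slice sent (some (p.2 + 1)) (some (endi + 1))
              if p.1 ≥ 1 then relabelSeg curr else curr) =
          (PySem.List.enumerate (posIdx sent) (0 + 1)).map
            (fun p => relabelSeg (PySem.List.slice sent (some (p.2 + 1))
              (some (PySem.List.pyGetD (mkCI sent) (p.1 + 1) 0 + 1)))) :=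
      List.map_congr_left (fun p hp => by
        simp only [ge_iff_le, if_pos (hmemge p hp)])
    have hdrop : (mkCI sent).drop 1 = posIdx sent ++ [((sent.length : Int)) - 1] := by
      unfold mkCI; rw [List.append_assoc]; rfl
    have h01 : ((0 : Int) + 1) = ((1 : Nat) : Int) := by norm_cast
    rw [hcong, h01]
    exact aux_enum
      (fun x y => relabelSeg (PySem.List.slice sent (some (x + 1)) (some (y + 1))))
      (posIdx sent) 1 (mkCI sent) _ hdrop (by simp)
  rw [htail]
  -- the right-hand side in the same shape
  have hraw : rawSlices sent (mkCI sent) =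
      PySem.List.slice sent (some ((-1 : Int) + 1)) (some (t0 + 1)) ::
        ((posIdx sent).zip ((posIdx sent) ++ [((sent.length : Int)) - 1]).tail).map
          (fun q => PySem.List.slice sent (some (q.1 + 1)) (some (q.2 + 1))) := by
    rw [rawSlices, hT, zipAdj_cons_cons, List.map_cons]
    congr 1
    have htl : (posIdx sent ++ [((sent.length : Int)) - 1]).tail = T2 := by
      rw [hT']; rfl
    show ((t0 :: T2).zip T2).map _ = _
    rw [← hT', ← htl, zip_concat_tail]
  rw [hraw]
  show _ = _ :: (List.map
      (fun q : Int × Int => PySem.List.slice sent (some (q.1 + 1)) (some (q.2 + 1)))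
      ((posIdx sent).zip ((posIdx sent) ++ [((sent.length : Int)) - 1]).tail)).map relabelSeg
  rw [List.map_map]
  rfl
-- ===== VERDICT (by name: the statement is the Claim_ definition above) =====
theorem split_by_colons_spec : Claim_equal_split_by_colons := by
  intro sent _ _
  unfold Spec_split_by_colons
  rw [A_eq_raw, rawSlices_eq_segsF]
  unfold split_by_colons_alt
  rw [altCollect_eq sent []]
  cases h : segsF sent with
  | nil => exact absurd h (segsF_ne_nil sent)
  | cons a t => simp
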